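-- pv_equiv track=rewrite | github.com/Morgan0787/AIMA | app/bot/telegram_bot.py | _normalize_interest_list
-- ===== SOURCE A (Python) =====
-- def _normalize_interest_list(raw: str) -> list[str]:
--     values = []
--     seen = set()
--     for item in raw.split(","):
--         value = item.strip().lower()
--         if value and value not in seen:
--             values.append(value)
--             seen.add(value)
--     return values
-- ===== SOURCE B (Python) =====
-- def _normalize_interest_list(raw: str) -> list[str]:
--     toks = [t for t in (item.strip().lower() for item in raw.split(",")) if t]
--     values = []
--     while toks:
--         head = toks[0]
--         values.append(head)
--         toks = [y for y in toks[1:] if y != head]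
--     return values
-- ===== Notes on version B (the rewrite author's own statement) =====
-- stated objective: alternative
-- what changed: Dedup by repeated head-extraction: after normalizing/filtering the tokens, the loop takes the first remaining token and filters all its later duplicates out of the rest of the list, so there is no seen-set and no membership test at all.
import Mathlib
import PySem

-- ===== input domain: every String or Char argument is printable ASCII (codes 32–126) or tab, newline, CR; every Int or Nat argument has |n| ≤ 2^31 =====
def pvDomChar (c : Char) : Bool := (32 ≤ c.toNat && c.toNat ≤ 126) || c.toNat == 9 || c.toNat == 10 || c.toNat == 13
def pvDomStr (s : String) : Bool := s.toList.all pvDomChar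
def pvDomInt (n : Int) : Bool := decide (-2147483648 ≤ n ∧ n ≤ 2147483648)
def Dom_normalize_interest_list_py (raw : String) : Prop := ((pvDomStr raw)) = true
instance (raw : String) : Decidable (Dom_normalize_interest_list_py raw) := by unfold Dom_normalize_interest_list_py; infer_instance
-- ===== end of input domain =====

-- B replaces A's seen-set/membership pass by repeated head-extraction with tail filtering (no seen set); same result, no speed claim.
-- ===== PORT A =====
-- raw.split(",") is Str.split? with nonempty separator ",", hence always `some`; `.getD []` unwraps it exactly.
def normalize_interest_list_py (raw : String) : List String :=
  (((PySem.Str.split? raw ",").getD []).foldl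
    (fun (st : List String × PySem.Set String) item =>
      let value := PySem.Str.lower (PySem.Str.strip item)
      if value != "" && !(PySem.Set.contains st.2 value) then
        (st.1 ++ [value], PySem.Set.add st.2 value)
      else st)
    ([], PySem.Set.empty)).1

-- ===== PORT B =====
-- port of Source B's while loop: take the head, append it, filter its duplicates out of the tail
def pvHeadFilterLoop (values : List String) : List String → List String
  | [] => values
  | head :: rest => pvHeadFilterLoop (values ++ [head]) (rest.filter (fun y => y != head))
termination_by toks => toks.length
decreasing_by
  simp only [List.length_cons, List.length_unattach, Nat.lt_succ_iff]
  exact le_trans (List.length_filter_le _ _) (by simp)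

def normalize_interest_list_py_alt (raw : String) : List String :=
  let toks := (((PySem.Str.split? raw ",").getD []).map
      (fun item => PySem.Str.lower (PySem.Str.strip item))).filter (fun t => t != "")
  pvHeadFilterLoop [] toks

-- ===== PRECONDITION & SPEC =====
def Spec_normalize_interest_list_py (raw : String) (out : List String) : Prop := out = normalize_interest_list_py_alt raw
instance (raw : String) (out : List String) : Decidable (Spec_normalize_interest_list_py raw out) := by unfold Spec_normalize_interest_list_py; infer_instance

-- ===== CLAIM (what is proved, stated in full; the proofs are below) =====
def Claim_equal_normalize_interest_list_py : Prop := ∀ (raw : String), Dom_normalize_interest_list_py raw → Spec_normalize_interest_list_py raw (normalize_interest_list_py raw)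

-- ===== LEMMAS AND PROOFS =====

-- A's loop keeps values = seen (same elements, same order); folding with both equal
theorem fold_pair (ys : List String) (s : PySem.Set String) (hs : s.Nodup) :
    ys.foldl
      (fun (st : List String × PySem.Set String) item =>
        let value := PySem.Str.lower (PySem.Str.strip item)
        if value != "" && !(PySem.Set.contains st.2 value) then
          (st.1 ++ [value], PySem.Set.add st.2 value)
        else st)
      (s, s)
    = (ys.foldl
        (fun (s : PySem.Set String) item =>
          let value := PySem.Str.lower (PySem.Str.strip item)
          if value != "" then PySem.Set.add s value else s)
        s,
       ys.foldl
        (fun (s : PySem.Set String) item =>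
          let value := PySem.Str.lower (PySem.Str.strip item)
          if value != "" then PySem.Set.add s value else s)
        s) := by
  induction ys generalizing s with
  | nil => rfl
  | cons y ys ih =>
    simp only [List.foldl_cons]
    by_cases h0 : PySem.Str.lower (PySem.Str.strip y) = ""
    · simp only [h0, bne_self_eq_false, Bool.false_and, Bool.false_eq_true, if_false]
      exact ih s hs
    · have hb : (PySem.Str.lower (PySem.Str.strip y) != "") = true := by
        simpa using h0
      by_cases hm : PySem.Str.lower (PySem.Str.strip y) ∈ s
      · have hc : PySem.Set.contains s (PySem.Str.lower (PySem.Str.strip y)) = true :=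
          (PySem.Set.contains_iff _ _).mpr hm
        simp only [hb, hc, Bool.not_true, Bool.and_false, Bool.false_eq_true, if_false,
          if_true, PySem.Set.add_of_mem hm]
        exact ih s hs
      · have hc : PySem.Set.contains s (PySem.Str.lower (PySem.Str.strip y)) = false := by
          cases h : PySem.Set.contains s (PySem.Str.lower (PySem.Str.strip y))
          · rfl
          · exact absurd ((PySem.Set.contains_iff _ _).mp h) hm
        simp only [hb, hc, Bool.not_false, Bool.and_true, if_true]
        rw [PySem.Set.add_of_not_mem hm]
        exact ih _ (by simp [List.nodup_append, hs]; intro a ha he; exact hm (he ▸ ha))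

-- B's loop is acc ++ dedup-by-filtering of the remaining tokens
theorem headFilterLoop_append (xs values : List String) :
    pvHeadFilterLoop values xs = values ++ pvHeadFilterLoop [] xs := by
  match xs with
  | [] => simp [pvHeadFilterLoop]
  | head :: rest =>
    rw [pvHeadFilterLoop, pvHeadFilterLoop,
        headFilterLoop_append (rest.filter (fun y => y != head)) (values ++ [head]),
        List.nil_append,
        headFilterLoop_append (rest.filter (fun y => y != head)) [head]]
    simp
termination_by xs.length
decreasing_by all_goals (simp only [List.length_cons, Nat.lt_succ_iff]; exact List.length_filter_le _ _)

theorem headFilterLoop_cons (h : String) (xs : List String) :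
    pvHeadFilterLoop [] (h :: xs) = h :: pvHeadFilterLoop [] (xs.filter (fun y => y != h)) := by
  rw [pvHeadFilterLoop, headFilterLoop_append]
  rfl

-- folding Set.add equals B's head-extraction loop on the not-yet-seen tokens
theorem foldl_add_eq_loop (xs acc : List String) :
    List.foldl PySem.Set.add acc xs
      = acc ++ pvHeadFilterLoop [] (xs.filter (fun y => !acc.contains y)) := by
  induction xs generalizing acc with
  | nil => simp [pvHeadFilterLoop]
  | cons h t ih =>
    simp only [List.foldl_cons, List.filter_cons]
    by_cases hm : h ∈ acc
    · have h1 : PySem.Set.add acc h = acc := by simp [PySem.Set.add, hm]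
      have h2 : (!acc.contains h) = false := by simp [hm]
      rw [h1, h2, if_neg (by simp), ih]
    · have h1 : PySem.Set.add acc h = acc ++ [h] := by simp [PySem.Set.add, hm]
      have h2 : (!acc.contains h) = true := by simp [hm]
      have hfilt : t.filter (fun y => !(acc ++ [h]).contains y)
          = (t.filter (fun y => !acc.contains y)).filter (fun y => y != h) := by
        rw [List.filter_filter]
        apply List.filter_congr
        intro y _
        by_cases hy : y = h <;> simp [hy, List.mem_append]
      rw [h1, h2, if_pos rfl, headFilterLoop_cons, ih (acc ++ [h]), hfilt]
      simp

-- ===== VERDICT (by name: the statement is the Claim_ definition above) =====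
theorem normalize_interest_list_py_spec : Claim_equal_normalize_interest_list_py := by
  intro raw _
  unfold Spec_normalize_interest_list_py normalize_interest_list_py normalize_interest_list_py_alt
  have hfp := fold_pair ((PySem.Str.split? raw ",").getD []) PySem.Set.empty List.nodup_nil
  rw [show (([], PySem.Set.empty) : List String × PySem.Set String)
        = ((PySem.Set.empty, PySem.Set.empty) : List String × PySem.Set String) from rfl, hfp]
  have := foldl_add_eq_loop
    ((((PySem.Str.split? raw ",").getD []).map
      (fun item => PySem.Str.lower (PySem.Str.strip item))).filter (fun t => t != ""))
    PySem.Set.empty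
  simp only [show (PySem.Set.empty : List String) = [] from rfl, List.contains_nil,
    Bool.not_false, List.filter_true, List.nil_append] at this
  rw [← this]
  simp only [List.foldl_filter, List.foldl_map]
  rfl
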